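-- pv_equiv track=rewrite | github.com/ldouguy/GraphRank | src/graphrank/GraphUtils.py | record_cycles
-- ===== SOURCE A (Python) =====
-- def record_cycles(G, partition):
--     in_cycle = {
--         v: set() for v in G
--     }
--
--     for S in partition:
--         for v in S:
--             S1 = G[v] & S
--             S2 = set()
--             for w in S1:
--                 S2 |= G[w]
--             for w in S2:
--                 if v in G[w]:
--                     in_cycle[v].add(w)
--                     in_cycle[w].add(v)
--
--     return in_cycle
-- ===== SOURCE B (Python) =====
-- def record_cycles(G, partition):
--     # Staged pipeline instead of in-place mutation of a dict of sets:
--     # 1) one flat comprehension emits the ordered stream of directed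
--     #    (endpoint, partner) events for every triangle v -> w1 -> w -> v
--     #    whose middle vertex w1 shares v's block,
--     # 2) dict.fromkeys deduplicates the stream in first-occurrence order,
--     # 3) a group-by over the graph's keys assembles the result.
--     events = [e
--               for S in partition
--               for v in S
--               for w1 in G[v] & S
--               for w in G[w1]
--               if v in G[w]
--               for e in ((v, w), (w, v))]
--     pairs = dict.fromkeys(events)
--     return {v: {w for (a, w) in pairs if a == v} for v in G}
-- ===== Notes on version B (the rewrite author's own statement) =====
-- stated objective: alternative
-- what changed: A mutates a dict of sets in place inside four nested loops (building a per-vertex union set S2 and adding both directions as it goes); B is a staged pipeline with different data structures: one flat comprehension emits an ordered stream of directed (endpoint, partner) events, dict.fromkeys deduplicates the stream, and a final group-by over G's keys assembles the result dict - no dict-of-sets is ever mutated.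
import Mathlib
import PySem

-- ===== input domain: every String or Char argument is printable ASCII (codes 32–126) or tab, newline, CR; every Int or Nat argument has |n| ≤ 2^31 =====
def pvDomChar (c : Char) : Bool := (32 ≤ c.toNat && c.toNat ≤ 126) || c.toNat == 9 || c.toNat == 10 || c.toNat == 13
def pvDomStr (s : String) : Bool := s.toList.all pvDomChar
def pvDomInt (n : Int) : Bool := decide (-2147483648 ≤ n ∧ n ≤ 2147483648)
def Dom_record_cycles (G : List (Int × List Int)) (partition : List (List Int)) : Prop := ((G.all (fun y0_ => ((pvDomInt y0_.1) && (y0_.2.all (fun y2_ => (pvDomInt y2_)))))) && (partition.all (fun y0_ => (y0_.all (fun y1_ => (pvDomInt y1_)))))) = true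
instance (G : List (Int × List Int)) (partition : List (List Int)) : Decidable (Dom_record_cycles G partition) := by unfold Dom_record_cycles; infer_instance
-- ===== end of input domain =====

-- B replaces A's in-place mutation of a dict of sets with a staged pipeline: one flat
-- comprehension emits the ordered stream of directed (endpoint, partner) events, an
-- ordered dedup, then a group-by over G's keys builds the result (no speed claim).
-- Proved on Pre_ (the inputs where Python A raises no KeyError).

-- G[v] for both ports: first-match lookup (Python raises KeyError when v is no key of G;
-- those inputs are excluded by Pre_record_cycles, where the total default [] is never used).
def pyGetG (G : List (Int × List Int)) (v : Int) : List Int :=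
  (PySem.Dict.mk G).getD v []

-- ===== PORT A =====
def record_cycles (G : List (Int × List Int)) (partition : List (List Int)) : List (Int × List Int) :=
  -- in_cycle = {v: set() for v in G}
  let in0 : PySem.Dict Int (PySem.Set Int) :=
    G.foldl (fun d p => d.insert p.1 PySem.Set.empty) PySem.Dict.empty
  -- for S in partition: for v in S: S1 = G[v] & S; S2 = set(); for w in S1: S2 |= G[w]; ...
  let fin :=
    partition.foldl (fun d S =>
      S.foldl (fun d v =>
        let S1 := PySem.Set.inter (pyGetG G v) S
        let S2 := S1.foldl (fun S2 w1 => PySem.Set.union S2 (pyGetG G w1)) PySem.Set.empty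
        S2.foldl (fun d w =>
          if PySem.Set.contains (pyGetG G w) v then
            -- in_cycle[v].add(w); in_cycle[w].add(v)  (keys present under Pre_, so the
            -- modify-default PySem.Set.empty is never consulted)
            (d.modify v PySem.Set.empty (fun s => PySem.Set.add s w)).modify w PySem.Set.empty
              (fun s => PySem.Set.add s v)
          else d) d) d) in0
  fin.items

-- ===== PORT B =====
def record_cycles_alt (G : List (Int × List Int)) (partition : List (List Int)) : List (Int × List Int) :=
  -- events = [e for S in partition for v in S for w1 in G[v] & S
  --             for w in G[w1] if v in G[w] for e in ((v, w), (w, v))]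
  let events : List (Int × Int) :=
    partition.flatMap (fun S =>
      S.flatMap (fun v =>
        (PySem.Set.inter (pyGetG G v) S).flatMap (fun w1 =>
          (pyGetG G w1).flatMap (fun w =>
            if PySem.Set.contains (pyGetG G w) v then [(v, w), (w, v)] else []))))
  -- pairs = dict.fromkeys(events)   (ordered dedup of the event stream)
  let pairs : List (Int × Int) := PySem.List.dedup events
  -- {v: {w for (a, w) in pairs if a == v} for v in G}
  let fin : PySem.Dict Int (PySem.Set Int) :=
    G.foldl (fun d p =>
      d.insert p.1
        (pairs.foldl (fun s e => if e.1 == p.1 then PySem.Set.add s e.2 else s)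
          PySem.Set.empty)) PySem.Dict.empty
  fin.items

-- ===== PRECONDITION & SPEC =====
-- Pre_ excludes exactly the inputs on which Python A raises KeyError: some vertex of a
-- partition block, or some neighbour reached from it, is not a key of G.
def Pre_record_cycles (G : List (Int × List Int)) (partition : List (List Int)) : Prop :=
  ∀ S ∈ partition, ∀ v ∈ S,
    v ∈ G.map Prod.fst ∧
    ∀ w1 ∈ pyGetG G v, w1 ∈ S →
      w1 ∈ G.map Prod.fst ∧ ∀ w ∈ pyGetG G w1, w ∈ G.map Prod.fst
instance (G : List (Int × List Int)) (partition : List (List Int)) : Decidable (Pre_record_cycles G partition) := by unfold Pre_record_cycles; infer_instance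

def pvWitness_record_cycles : (List (Int × List Int)) × List (List Int) :=
  ([(0, [1]), (1, [0])], [[0, 1]])

def Spec_record_cycles (G : List (Int × List Int)) (partition : List (List Int)) (out : List (Int × List Int)) : Prop := out = record_cycles_alt G partition
instance (G : List (Int × List Int)) (partition : List (List Int)) (out : List (Int × List Int)) : Decidable (Spec_record_cycles G partition out) := by unfold Spec_record_cycles; infer_instance

-- ===== CLAIM (what is proved, stated in full; the proofs are below) =====
def Claim_equal_record_cycles : Prop := ∀ (G : List (Int × List Int)) (partition : List (List Int)), Dom_record_cycles G partition → Pre_record_cycles G partition → Spec_record_cycles G partition (record_cycles G partition)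

-- ===== LEMMAS AND PROOFS =====

-- A's per-candidate body (defeq to the innermost lambda of port A).
def pvStep (G : List (Int × List Int)) (v : Int) (d : PySem.Dict Int (PySem.Set Int)) (w : Int) :
    PySem.Dict Int (PySem.Set Int) :=
  if PySem.Set.contains (pyGetG G w) v then
    (d.modify v PySem.Set.empty (fun s => PySem.Set.add s w)).modify w PySem.Set.empty
      (fun s => PySem.Set.add s v)
  else d

-- one directed event: d[a].add(b)
def pvStep1 (d : PySem.Dict Int (PySem.Set Int)) (e : Int × Int) : PySem.Dict Int (PySem.Set Int) :=
  d.modify e.1 PySem.Set.empty (fun s => PySem.Set.add s e.2)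

-- the (up to two) directed events one candidate w generates for vertex v
def pvGen (G : List (Int × List Int)) (v w : Int) : List (Int × Int) :=
  if PySem.Set.contains (pyGetG G w) v then [(v, w), (w, v)] else []

-- the directed-event stream of one (block, vertex) step, and of the whole run
def pvEventsV (G : List (Int × List Int)) (S : List Int) (v : Int) : List (Int × Int) :=
  (PySem.Set.inter (pyGetG G v) S).flatMap (fun w1 => (pyGetG G w1).flatMap (pvGen G v))

def pvE2 (G : List (Int × List Int)) (partition : List (List Int)) : List (Int × Int) :=
  partition.flatMap (fun S => S.flatMap (pvEventsV G S))

-- per-key projection of one directed event (defeq to B's set-comprehension body)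
def pvProj (k : Int) (s : PySem.Set Int) (e : Int × Int) : PySem.Set Int :=
  if e.1 == k then PySem.Set.add s e.2 else s

-- "the pair (v, w) has already been recorded" — the invariant making pvStep idempotent.
def pvP (G : List (Int × List Int)) (v w : Int) (d : PySem.Dict Int (PySem.Set Int)) : Prop :=
  PySem.Set.contains (pyGetG G w) v = true →
    (∃ sv, d.get? v = some sv ∧ w ∈ sv) ∧ (∃ sw, d.get? w = some sw ∧ v ∈ sw)

lemma pv_foldl_inv {β δ : Type} (Inv : δ → Prop) (f : δ → β → δ)
    (h : ∀ d b, Inv d → Inv (f d b)) :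
    ∀ (l : List β) (d : δ), Inv d → Inv (l.foldl f d)
  | [], _, hd => hd
  | b :: t, d, hd => pv_foldl_inv Inv f h t (f d b) (h d b hd)

lemma pv_foldl_congr_inv {β δ : Type} (Inv : δ → Prop) (f g : δ → β → δ)
    (hf : ∀ d b, Inv d → Inv (f d b)) (heq : ∀ d b, Inv d → f d b = g d b) :
    ∀ (l : List β) (d : δ), Inv d → l.foldl f d = l.foldl g d
  | [], _, _ => rfl
  | b :: t, d, hd => by
      simp only [List.foldl_cons]
      rw [← heq d b hd]
      exact pv_foldl_congr_inv Inv f g hf heq t (f d b) (hf d b hd)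

-- a loop whose body is itself a fold is the fold over the flattened list
lemma pv_foldl_flatMap {α γ δ : Type} (f : δ → γ → δ) (g : α → List γ) :
    ∀ (l : List α) (d : δ),
      l.foldl (fun d x => (g x).foldl f d) d = (l.flatMap g).foldl f d
  | [], _ => rfl
  | x :: t, d => by
      simp only [List.foldl_cons, List.flatMap_cons, List.foldl_append]
      exact pv_foldl_flatMap f g t _

-- A's union loop is the add-fold over the flattened adjacency lists.
lemma pv_foldl_union {α : Type} [BEq α] (g : α → List α) :
    ∀ (l : List α) (s : PySem.Set α),
      l.foldl (fun acc x => PySem.Set.union acc (g x)) s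
        = (l.flatMap g).foldl PySem.Set.add s
  | [], _ => rfl
  | x :: t, s => by
      simp only [List.foldl_cons, List.flatMap_cons, List.foldl_append]
      exact pv_foldl_union g t (PySem.Set.union s (g x))

lemma pv_add_prefix {α : Type} [BEq α] :
    ∀ (t s : List α), ∃ r, t.foldl PySem.Set.add s = s ++ r
  | [], s => ⟨[], by simp⟩
  | y :: t, s => by
      simp only [List.foldl_cons]
      cases hy : PySem.Set.contains s y
      · obtain ⟨r, hr⟩ := pv_add_prefix t (s ++ [y])
        refine ⟨y :: r, ?_⟩
        have ha : PySem.Set.add s y = s ++ [y] := by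
          simp [PySem.Set.add, PySem.Set.contains] at hy ⊢
          simp [hy]
        rw [ha, hr, List.append_assoc]
        rfl
      · obtain ⟨r, hr⟩ := pv_add_prefix t s
        refine ⟨r, ?_⟩
        have ha : PySem.Set.add s y = s := by
          simp [PySem.Set.add, PySem.Set.contains] at hy ⊢
          simp [hy]
        rw [ha, hr]

-- Folding an idempotent-per-element step over the deduplicated list equals folding it
-- over the raw list.
lemma pv_foldl_dedup {α δ : Type} [BEq α] [LawfulBEq α]
    (f : δ → α → δ) (Inv : δ → Prop) (P : α → δ → Prop)
    (hInv : ∀ d x, Inv d → Inv (f d x))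
    (h1 : ∀ d x, Inv d → P x (f d x))
    (h2 : ∀ d x y, Inv d → P x d → P x (f d y))
    (h3 : ∀ d x, Inv d → P x d → f d x = d) :
    ∀ (t s : List α) (d : δ), Inv d → (∀ x ∈ s, P x d) →
      (List.drop s.length (t.foldl PySem.Set.add s)).foldl f d = t.foldl f d := by
  intro t
  induction t with
  | nil => intro s d _ _; simp
  | cons y t ih =>
    intro s d hd hs
    simp only [List.foldl_cons]
    cases hy : PySem.Set.contains s y
    · have ha : PySem.Set.add s y = s ++ [y] := by
        simp [PySem.Set.add, PySem.Set.contains] at hy ⊢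
        simp [hy]
      obtain ⟨r, hr⟩ := pv_add_prefix t (s ++ [y])
      have hdrop : List.drop s.length (t.foldl PySem.Set.add (s ++ [y])) = y :: r := by
        rw [hr, List.append_assoc, List.drop_left]
        rfl
      have hr2 : r = List.drop (s ++ [y]).length (t.foldl PySem.Set.add (s ++ [y])) := by
        rw [hr, List.drop_left]
      rw [ha, hdrop]
      simp only [List.foldl_cons]
      rw [hr2]
      refine ih (s ++ [y]) (f d y) (hInv d y hd) ?_
      intro x hx
      rcases List.mem_append.mp hx with h | h
      · exact h2 d x y hd (hs x h)
      · have : x = y := by simpa using h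
        subst this
        exact h1 d x hd
    · have ha : PySem.Set.add s y = s := by
        simp [PySem.Set.add, PySem.Set.contains] at hy ⊢
        simp [hy]
      have hmem : y ∈ s := by
        have : List.contains s y = true := by
          simpa [PySem.Set.contains] using hy
        exact List.contains_iff_mem.mp this
      rw [ha, h3 d y hd (hs y hmem)]
      exact ih s d hd hs

lemma pv_foldl_ofList {α δ : Type} [BEq α] [LawfulBEq α]
    (f : δ → α → δ) (Inv : δ → Prop) (P : α → δ → Prop)
    (hInv : ∀ d x, Inv d → Inv (f d x))
    (h1 : ∀ d x, Inv d → P x (f d x))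
    (h2 : ∀ d x y, Inv d → P x d → P x (f d y))
    (h3 : ∀ d x, Inv d → P x d → f d x = d)
    (t : List α) (d : δ) (hd : Inv d) :
    (t.foldl PySem.Set.add PySem.Set.empty).foldl f d = t.foldl f d := by
  have h := pv_foldl_dedup f Inv P hInv h1 h2 h3 t [] d hd (by simp)
  simpa [PySem.Set.empty] using h

lemma pv_map_repl_of_not_mem {ν : Type} (g : Int × ν → Int × ν) :
    ∀ (l : List (Int × ν)) (k : Int), k ∉ l.map Prod.fst →
      l.map (fun p => if p.1 == k then g p else p) = l
  | [], _, _ => rfl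
  | p :: t, k, h => by
      simp only [List.map_cons, List.mem_cons, not_or] at h
      have hp : (p.1 == k) = false := by
        exact beq_eq_false_iff_ne.mpr (fun e => h.1 e.symm)
      simp only [List.map_cons, hp, if_false, Bool.false_eq_true]
      rw [pv_map_repl_of_not_mem g t k h.2]

-- With unique keys, two entries sharing a key are the same entry.
lemma pv_eq_of_fst_eq {ν : Type} :
    ∀ (l : List (Int × ν)), (l.map Prod.fst).Nodup →
      ∀ p ∈ l, ∀ q ∈ l, p.1 = q.1 → p = q
  | [], _, _, h, _, _, _ => by simp at h
  | x :: t, hnd, p, hp, q, hq, hpq => by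
      simp only [List.map_cons, List.nodup_cons] at hnd
      rcases List.mem_cons.mp hp with hp1 | hp2 <;> rcases List.mem_cons.mp hq with hq1 | hq2
      · rw [hp1, hq1]
      · exfalso
        apply hnd.1
        have h1 : x.1 = q.1 := by rw [← hp1]; exact hpq
        rw [h1]
        exact List.mem_map.mpr ⟨q, hq2, rfl⟩
      · exfalso
        apply hnd.1
        have h1 : x.1 = p.1 := by rw [← hq1]; exact hpq.symm
        rw [h1]
        exact List.mem_map.mpr ⟨p, hp2, rfl⟩
      · exact pv_eq_of_fst_eq t hnd.2 p hp2 q hq2 hpq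

-- modify on an existing key rewrites exactly that entry's value, in place.
lemma pv_items_modify (d : PySem.Dict Int (PySem.Set Int)) (k : Int)
    (f : PySem.Set Int → PySem.Set Int) (hnd : d.keys.Nodup) (hk : k ∈ d.keys) :
    (d.modify k PySem.Set.empty f).items
      = d.items.map (fun p => if p.1 == k then (k, f p.2) else p) := by
  obtain ⟨q, hq, hqk⟩ := List.mem_map.mp hk
  have hc : d.contains k = true := (PySem.Dict.contains_iff_mem_keys d k).mpr hk
  have hget : d.getD k PySem.Set.empty = q.2 := by
    have : (k, q.2) ∈ d.items := by rw [← hqk]; exact hq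
    exact PySem.Dict.getD_of_mem_items d this hnd PySem.Set.empty
  simp only [PySem.Dict.modify]
  rw [PySem.Dict.items_insert_of_contains d _ hc, hget]
  apply List.map_congr_left
  intro p hp
  by_cases h : (p.1 == k) = true
  · have hpq : p = (k, q.2) := by
      refine pv_eq_of_fst_eq d.items hnd p hp (k, q.2) ?_ (beq_iff_eq.mp h)
      rw [← hqk]; exact hq
    simp only [h, if_true]
    rw [hpq]
  · have h' : (p.1 == k) = false := by simpa using h
    simp only [h', Bool.false_eq_true, if_false]

lemma pv_keys_step1 (d : PySem.Dict Int (PySem.Set Int)) (e : Int × Int)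
    (hnd : d.keys.Nodup) (he : e.1 ∈ d.keys) : (pvStep1 d e).keys = d.keys := by
  have h := pv_items_modify d e.1 (fun s => PySem.Set.add s e.2) hnd he
  unfold pvStep1
  show (d.modify e.1 PySem.Set.empty _).items.map Prod.fst = d.items.map Prod.fst
  rw [h, List.map_map]
  apply List.map_congr_left
  intro p _
  by_cases hb : p.1 = e.1 <;> simp [Function.comp, hb]

-- the per-key projection of a run of directed events on a dict with those keys
lemma pv_fold_step1_items :
    ∀ (L : List (Int × Int)) (d : PySem.Dict Int (PySem.Set Int)),
      d.keys.Nodup → (∀ e ∈ L, e.1 ∈ d.keys) →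
      (L.foldl pvStep1 d).items = d.items.map (fun p => (p.1, L.foldl (pvProj p.1) p.2))
  | [], d, _, _ => by simp
  | e :: L, d, hnd, hL => by
      simp only [List.foldl_cons]
      have he : e.1 ∈ d.keys := hL e (by simp)
      have hkeys : (pvStep1 d e).keys = d.keys := pv_keys_step1 d e hnd he
      have ih := pv_fold_step1_items L (pvStep1 d e) (hkeys ▸ hnd)
        (fun x hx => hkeys ▸ hL x (List.mem_cons_of_mem _ hx))
      rw [ih]
      have hitems : (pvStep1 d e).items
          = d.items.map (fun p => if p.1 == e.1 then (e.1, PySem.Set.add p.2 e.2) else p) :=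
        pv_items_modify d e.1 (fun s => PySem.Set.add s e.2) hnd he
      rw [hitems, List.map_map]
      apply List.map_congr_left
      intro p _
      simp only [Function.comp]
      by_cases hb : p.1 = e.1
      · simp [pvProj, hb]
      · have h1 : (p.1 == e.1) = false := beq_eq_false_iff_ne.mpr hb
        have h2 : (e.1 == p.1) = false := beq_eq_false_iff_ne.mpr (Ne.symm hb)
        simp [pvProj, h1, h2]

-- one pvStep is the fold of its (≤ 2) directed events
lemma pv_step_eq_gen (G : List (Int × List Int)) (v : Int)
    (d : PySem.Dict Int (PySem.Set Int)) (w : Int) :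
    pvStep G v d w = (pvGen G v w).foldl pvStep1 d := by
  unfold pvStep pvGen
  split <;> rfl

lemma pvStep_inv (G : List (Int × List Int)) (v : Int) :
    ∀ (d : PySem.Dict Int (PySem.Set Int)) (w : Int),
      d.keys.Nodup → (pvStep G v d w).keys.Nodup := by
  intro d w h
  unfold pvStep
  split
  · simp only [PySem.Dict.modify]
    exact PySem.Dict.nodup_keys_insert _ _ _ (PySem.Dict.nodup_keys_insert _ _ _ h)
  · exact h

lemma pv_get?_modify_mem (d : PySem.Dict Int (PySem.Set Int)) (k j z y : Int) (s : PySem.Set Int)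
    (hj : d.get? j = some s) (hy : y ∈ s) :
    ∃ s', (d.modify k PySem.Set.empty (fun t => PySem.Set.add t z)).get? j = some s' ∧ y ∈ s' := by
  by_cases hjk : j = k
  · subst hjk
    refine ⟨(d.getD j PySem.Set.empty).add z, ?_, ?_⟩
    · simp only [PySem.Dict.modify]
      exact PySem.Dict.get?_insert_self d j _
    · have he : d.getD j PySem.Set.empty = s := by
        simp [PySem.Dict.getD, hj]
      rw [he]
      exact (PySem.Set.mem_add s z y).mpr (Or.inl hy)
  · refine ⟨s, ?_, hy⟩
    simp only [PySem.Dict.modify]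
    rw [PySem.Dict.get?_insert_of_ne d _ hjk]
    exact hj

lemma pvStep_P_self (G : List (Int × List Int)) (v : Int) :
    ∀ (d : PySem.Dict Int (PySem.Set Int)) (w : Int),
      d.keys.Nodup → pvP G v w (pvStep G v d w) := by
  intro d w _
  unfold pvP
  intro hc
  unfold pvStep
  rw [if_pos hc]
  simp only [PySem.Dict.modify]
  constructor
  · by_cases hvw : v = w
    · subst hvw
      exact ⟨_, PySem.Dict.get?_insert_self _ v _,
        (PySem.Set.mem_add _ v v).mpr (Or.inr rfl)⟩
    · refine ⟨(d.getD v PySem.Set.empty).add w, ?_, ?_⟩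
      · rw [PySem.Dict.get?_insert_of_ne _ _ hvw]
        exact PySem.Dict.get?_insert_self d v _
      · exact (PySem.Set.mem_add _ w w).mpr (Or.inr rfl)
  · exact ⟨_, PySem.Dict.get?_insert_self _ w _,
      (PySem.Set.mem_add _ v v).mpr (Or.inr rfl)⟩

lemma pvStep_P_mono (G : List (Int × List Int)) (v : Int) :
    ∀ (d : PySem.Dict Int (PySem.Set Int)) (w y : Int),
      d.keys.Nodup → pvP G v w d → pvP G v w (pvStep G v d y) := by
  intro d w y _ hP
  unfold pvP at hP ⊢
  intro hc
  obtain ⟨⟨sv, hv, hwv⟩, ⟨sw, hw, hvw⟩⟩ := hP hc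
  unfold pvStep
  split
  · obtain ⟨s1, hs1, m1⟩ := pv_get?_modify_mem d v v y w sv hv hwv
    obtain ⟨s2, hs2, m2⟩ :=
      pv_get?_modify_mem (d.modify v PySem.Set.empty (fun s => PySem.Set.add s y)) y v v w s1 hs1 m1
    obtain ⟨t1, ht1, n1⟩ := pv_get?_modify_mem d v w y v sw hw hvw
    obtain ⟨t2, ht2, n2⟩ :=
      pv_get?_modify_mem (d.modify v PySem.Set.empty (fun s => PySem.Set.add s y)) y w v v t1 ht1 n1
    exact ⟨⟨s2, hs2, m2⟩, ⟨t2, ht2, n2⟩⟩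
  · exact ⟨⟨sv, hv, hwv⟩, ⟨sw, hw, hvw⟩⟩

lemma pv_find_map_repl {ν : Type} :
    ∀ (l : List (Int × ν)) (k : Int) (x : ν),
      (l.map Prod.fst).Nodup →
      Option.map (fun p => p.2) (l.find? (fun p => p.1 == k)) = some x →
      l.map (fun p => if p.1 == k then (k, x) else p) = l
  | [], _, _, _, hf => by simp at hf
  | p :: t, k, x, hnd, hf => by
      simp only [List.map_cons, List.nodup_cons] at hnd
      by_cases hp : (p.1 == k) = true
      · have hk : p.1 = k := beq_iff_eq.mp hp
        rw [List.find?_cons_of_pos (p := fun q => q.1 == k) (a := p) (l := t) hp] at hf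
        have hx : p.2 = x := by simpa using hf
        have hnm : k ∉ t.map Prod.fst := by rw [← hk]; exact hnd.1
        simp only [List.map_cons, hp, if_true]
        rw [pv_map_repl_of_not_mem (fun _ => (k, x)) t k hnm]
        have : (k, x) = p := by rw [← hk, ← hx]
        rw [this]
      · have hp' : (p.1 == k) = false := by simpa using hp
        rw [List.find?_cons_of_neg (p := fun q => q.1 == k) (a := p) (l := t) (by simp [hp'])] at hf
        simp only [List.map_cons, hp', if_false, Bool.false_eq_true]
        rw [pv_find_map_repl t k x hnd.2 hf]

-- Re-inserting a key with its current value is the identity (keys unique).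
lemma pv_insert_self {ν : Type} (d : PySem.Dict Int ν) (k : Int) (x : ν)
    (hnd : d.keys.Nodup) (hget : d.get? k = some x) : d.insert k x = d := by
  have hc : d.contains k = true := by
    rw [PySem.Dict.contains_eq_isSome_get?, hget]; rfl
  have hrepl : d.items.map (fun p => if p.1 == k then (k, x) else p) = d.items :=
    pv_find_map_repl d.items k x hnd hget
  apply PySem.Dict.ext
  simp only [PySem.Dict.insert, hc, if_true]
  exact hrepl

lemma pvStep_P_idem (G : List (Int × List Int)) (v : Int) :
    ∀ (d : PySem.Dict Int (PySem.Set Int)) (w : Int),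
      d.keys.Nodup → pvP G v w d → pvStep G v d w = d := by
  intro d w hnd hP
  unfold pvStep
  by_cases hc : PySem.Set.contains (pyGetG G w) v = true
  · rw [if_pos hc]
    unfold pvP at hP
    obtain ⟨⟨sv, hv, hwv⟩, ⟨sw, hw, hvw⟩⟩ := hP hc
    have e1 : d.modify v PySem.Set.empty (fun s => PySem.Set.add s w) = d := by
      simp only [PySem.Dict.modify]
      have hg : d.getD v PySem.Set.empty = sv := by simp [PySem.Dict.getD, hv]
      rw [hg]
      have hadd : PySem.Set.add sv w = sv := by
        simp [PySem.Set.add, PySem.Set.contains, hwv]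
      rw [hadd]
      exact pv_insert_self d v sv hnd hv
    rw [e1]
    simp only [PySem.Dict.modify]
    have hg2 : d.getD w PySem.Set.empty = sw := by simp [PySem.Dict.getD, hw]
    rw [hg2]
    have hadd2 : PySem.Set.add sw v = sw := by
      simp [PySem.Set.add, PySem.Set.contains, hvw]
    rw [hadd2]
    exact pv_insert_self d w sw hnd hw
  · rw [if_neg hc]

-- A's inner loops for one (S, v) are the fold of that step's directed events.
lemma pv_inner (G : List (Int × List Int)) (S : List Int) (v : Int)
    (d : PySem.Dict Int (PySem.Set Int)) (hnd : d.keys.Nodup) :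
    ((PySem.Set.inter (pyGetG G v) S).foldl
        (fun S2 w1 => PySem.Set.union S2 (pyGetG G w1)) PySem.Set.empty).foldl (pvStep G v) d
      = (pvEventsV G S v).foldl pvStep1 d := by
  rw [pv_foldl_union (pyGetG G)]
  rw [pv_foldl_ofList (pvStep G v) (fun d => d.keys.Nodup) (pvP G v)
    (fun d x h => pvStep_inv G v d x h)
    (fun d x h => pvStep_P_self G v d x h)
    (fun d x y h hp => pvStep_P_mono G v d x y h hp)
    (fun d x h hp => pvStep_P_idem G v d x h hp)
    _ d hnd]
  have hfun : pvStep G v = fun d w => (pvGen G v w).foldl pvStep1 d :=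
    funext fun d => funext fun w => pv_step_eq_gen G v d w
  rw [hfun, pv_foldl_flatMap pvStep1 (pvGen G v)]
  unfold pvEventsV
  rw [List.flatMap_assoc]

-- A is the fold of the whole directed-event stream over the zero-initialised dict.
lemma pv_A_eq_fold (G : List (Int × List Int)) (partition : List (List Int)) :
    record_cycles G partition
      = ((pvE2 G partition).foldl pvStep1
          (G.foldl (fun d p => d.insert p.1 PySem.Set.empty) PySem.Dict.empty)).items := by
  unfold record_cycles
  show (partition.foldl (fun d S =>
      S.foldl (fun d v =>
        ((PySem.Set.inter (pyGetG G v) S).foldl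
          (fun S2 w1 => PySem.Set.union S2 (pyGetG G w1)) PySem.Set.empty).foldl
          (pvStep G v) d) d)
      (G.foldl (fun d p => d.insert p.1 PySem.Set.empty) PySem.Dict.empty)).items = _
  apply congrArg PySem.Dict.items
  have hin0 : (G.foldl (fun d p => d.insert p.1 PySem.Set.empty)
      (PySem.Dict.empty : PySem.Dict Int (PySem.Set Int))).keys.Nodup :=
    PySem.Dict.nodup_keys_foldl_insert_key G Prod.fst (fun _ _ => PySem.Set.empty)
      PySem.Dict.empty PySem.Dict.nodup_keys_empty
  refine Eq.trans (pv_foldl_congr_inv (fun d => d.keys.Nodup) _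
      (fun d S => (S.flatMap (pvEventsV G S)).foldl pvStep1 d) ?_ ?_ partition _ hin0)
    (pv_foldl_flatMap pvStep1 (fun S => S.flatMap (pvEventsV G S)) partition _)
  · intro d S h
    exact pv_foldl_inv _ _ (fun d v hh =>
      pv_foldl_inv _ _ (fun d w hhh => pvStep_inv G v d w hhh) _ d hh) S d h
  · intro d S h
    refine Eq.trans (pv_foldl_congr_inv (fun d => d.keys.Nodup) _
        (fun d v => (pvEventsV G S v).foldl pvStep1 d) ?_ ?_ S d h)
      (pv_foldl_flatMap pvStep1 (pvEventsV G S) S d)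
    · intro d v hh
      exact pv_foldl_inv _ _ (fun d w hhh => pvStep_inv G v d w hhh) _ d hh
    · intro d v hh
      exact pv_inner G S v d hh

-- every key of the zero-initialised dict is a key of G, and conversely
lemma pv_mem_keys_in0 (G : List (Int × List Int)) (a : Int) :
    a ∈ (G.foldl (fun d p => d.insert p.1 PySem.Set.empty)
        (PySem.Dict.empty : PySem.Dict Int (PySem.Set Int))).keys ↔ a ∈ G.map Prod.fst := by
  rw [PySem.Dict.keys_foldl_insert_key G Prod.fst (fun _ _ => PySem.Set.empty) PySem.Dict.empty]
  have : (PySem.Dict.empty : PySem.Dict Int (PySem.Set Int)).keys = [] := rfl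
  rw [this, PySem.Set.update_nil_left]
  exact PySem.Set.mem_ofList _ _

-- under Pre_, every event endpoint is a key of G
lemma pv_E2_heads (G : List (Int × List Int)) (partition : List (List Int))
    (hpre : Pre_record_cycles G partition) :
    ∀ e ∈ pvE2 G partition, e.1 ∈ G.map Prod.fst := by
  intro e he
  unfold pvE2 pvEventsV at he
  obtain ⟨S, hS, he⟩ := List.mem_flatMap.mp he
  obtain ⟨v, hv, he⟩ := List.mem_flatMap.mp he
  obtain ⟨w1, hw1, he⟩ := List.mem_flatMap.mp he
  obtain ⟨w, hw, he⟩ := List.mem_flatMap.mp he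
  have hinter : PySem.Set.inter (pyGetG G v) S
      = (pyGetG G v).filter (fun x => PySem.Set.contains S x) := rfl
  rw [hinter] at hw1
  have hw1m : w1 ∈ pyGetG G v := (List.mem_filter.mp hw1).1
  have hw1S : w1 ∈ S := by
    have hc := (List.mem_filter.mp hw1).2
    simpa [PySem.Set.contains] using hc
  obtain ⟨hvK, hrest⟩ := hpre S hS v hv
  obtain ⟨_, hwK⟩ := hrest w1 hw1m hw1S
  unfold pvGen at he
  by_cases hc : PySem.Set.contains (pyGetG G w) v = true
  · rw [if_pos hc] at he
    simp only [List.mem_cons, List.not_mem_nil, or_false] at he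
    rcases he with rfl | rfl
    · exact hvK
    · exact hwK w hw
  · rw [if_neg hc] at he
    simp at he

-- all initial values are the empty set
lemma pv_in0_values (G : List (Int × List Int)) :
    ∀ p ∈ (G.foldl (fun d p => d.insert p.1 PySem.Set.empty)
        (PySem.Dict.empty : PySem.Dict Int (PySem.Set Int))).items, p.2 = PySem.Set.empty := by
  have gen : ∀ (l : List (Int × List Int)) (d : PySem.Dict Int (PySem.Set Int)),
      (∀ p ∈ d.items, p.2 = PySem.Set.empty) →
      ∀ p ∈ (l.foldl (fun d p => d.insert p.1 PySem.Set.empty) d).items, p.2 = PySem.Set.empty := by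
    intro l
    induction l with
    | nil => intro d hd; exact hd
    | cons q t ih =>
      intro d hd
      simp only [List.foldl_cons]
      apply ih
      intro p hp
      rcases (PySem.Dict.mem_items_insert d q.1 PySem.Set.empty p).mp hp with h | h
      · rw [h]
      · exact hd p h.1
  exact gen G PySem.Dict.empty (by intro p hp; simp [PySem.Dict.empty] at hp)

-- B's key-indexed build, compared with the zero-valued build, entry by entry
lemma pv_B_build (h : Int → PySem.Set Int) :
    ∀ (l : List (Int × List Int)) (d d' : PySem.Dict Int (PySem.Set Int)),
      d'.items = d.items.map (fun p => (p.1, h p.1)) →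
      (l.foldl (fun dd q => dd.insert q.1 (h q.1)) d').items
        = (l.foldl (fun dd q => dd.insert q.1 PySem.Set.empty) d).items.map
            (fun p => (p.1, h p.1))
  | [], d, d', hdd => hdd
  | q :: t, d, d', hdd => by
      simp only [List.foldl_cons]
      apply pv_B_build h t
      have hkeys : d'.keys = d.keys := by
        show d'.items.map Prod.fst = d.items.map Prod.fst
        rw [hdd, List.map_map]
        rfl
      have hcon : d'.contains q.1 = d.contains q.1 := by
        by_cases hmem : q.1 ∈ d.keys
        · rw [(PySem.Dict.contains_iff_mem_keys d' q.1).mpr (hkeys ▸ hmem),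
            (PySem.Dict.contains_iff_mem_keys d q.1).mpr hmem]
        · have h1 : d'.contains q.1 = false := by
            rw [Bool.eq_false_iff]
            intro hc
            exact hmem (hkeys ▸ (PySem.Dict.contains_iff_mem_keys d' q.1).mp hc)
          have h2 : d.contains q.1 = false := by
            rw [Bool.eq_false_iff]
            intro hc
            exact hmem ((PySem.Dict.contains_iff_mem_keys d q.1).mp hc)
          rw [h1, h2]
      by_cases hc : d.contains q.1 = true
      · rw [PySem.Dict.items_insert_of_contains d' _ (hcon ▸ hc),
          PySem.Dict.items_insert_of_contains d _ hc, hdd, List.map_map, List.map_map]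
        apply List.map_congr_left
        intro p _
        simp only [Function.comp]
        by_cases hb : p.1 = q.1 <;> simp [hb]
      · have hc' : d.contains q.1 = false := by
          rwa [Bool.not_eq_true] at hc
        rw [PySem.Dict.items_insert_of_not_contains d' _ (hcon ▸ hc'),
          PySem.Dict.items_insert_of_not_contains d _ hc', hdd, List.map_append]
        rfl

-- the group-by over the deduplicated pair list equals the one over the raw stream
lemma pv_proj_dedup (k : Int) (L : List (Int × Int)) :
    (PySem.List.dedup L).foldl (pvProj k) PySem.Set.empty
      = L.foldl (pvProj k) PySem.Set.empty := by
  show (PySem.Set.ofList L).foldl (pvProj k) PySem.Set.empty = _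
  rw [PySem.Set.ofList_eq_foldl]
  exact pv_foldl_ofList (pvProj k) (fun _ => True)
    (fun e s => (e.1 == k) = true → e.2 ∈ s)
    (fun _ _ _ => trivial)
    (fun s e _ hk => by simp [pvProj, hk, PySem.Set.mem_add])
    (fun s e y _ hP hk => by
      unfold pvProj
      split
      · exact (PySem.Set.mem_add _ _ _).mpr (Or.inl (hP hk))
      · exact hP hk)
    (fun s e _ hP => by
      unfold pvProj
      split
      · exact PySem.Set.add_of_mem (hP (by assumption))
      · rfl)
    L PySem.Set.empty trivial

lemma pv_main (G : List (Int × List Int)) (partition : List (List Int))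
    (hpre : Pre_record_cycles G partition) :
    record_cycles G partition = record_cycles_alt G partition := by
  have hin0 : (G.foldl (fun d p => d.insert p.1 PySem.Set.empty)
      (PySem.Dict.empty : PySem.Dict Int (PySem.Set Int))).keys.Nodup :=
    PySem.Dict.nodup_keys_foldl_insert_key G Prod.fst (fun _ _ => PySem.Set.empty)
      PySem.Dict.empty PySem.Dict.nodup_keys_empty
  -- A's side: per-key projection of the event stream
  rw [pv_A_eq_fold G partition,
    pv_fold_step1_items (pvE2 G partition) _ hin0
      (fun e he => (pv_mem_keys_in0 G e.1).mpr (pv_E2_heads G partition hpre e he))]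
  -- B's side: the key-indexed build (record_cycles_alt is this build, definitionally)
  have hB : record_cycles_alt G partition
      = (G.foldl (fun d p => d.insert p.1 PySem.Set.empty)
          (PySem.Dict.empty : PySem.Dict Int (PySem.Set Int))).items.map
          (fun p => (p.1, (PySem.List.dedup (pvE2 G partition)).foldl (pvProj p.1)
            PySem.Set.empty)) :=
    pv_B_build (fun k => (PySem.List.dedup (pvE2 G partition)).foldl (pvProj k) PySem.Set.empty)
      G PySem.Dict.empty PySem.Dict.empty rfl
  rw [hB]
  apply List.map_congr_left
  intro p hp
  rw [pv_in0_values G p hp, pv_proj_dedup p.1 (pvE2 G partition)]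

-- ===== VERDICT (by name: the statement is the Claim_ definition above) =====
theorem record_cycles_spec : Claim_equal_record_cycles := by
  intro G partition _ hpre
  unfold Spec_record_cycles
  exact pv_main G partition hpre
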